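-- pv_equiv track=rewrite | github.com/agnitas-org/openemm | backend/src/script/lib/agn3/pattern.py | SQL_wildcard_transform
-- ===== SOURCE A (Python) =====
-- def SQL_wildcard_transform (s: str) -> str:
-- 	"""transforms a SQL wildcard expression to a regular expression"""
-- 	r = ''
-- 	needFinal = True
-- 	for ch in s:
-- 		needFinal = True
-- 		if ch in '$^*?()+[{]}|\\.':
-- 			r += f'\\{ch}'
-- 		elif ch == '%':
-- 			r += '.*'
-- 			needFinal = False
-- 		elif ch == '_':
-- 			r += '.'
-- 		else:
-- 			r += ch
-- 	if needFinal:
-- 		r += '$'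
-- 	return r
-- ===== SOURCE B (Python) =====
-- # B: segment decomposition -- split the pattern at '%' into literal segments,
-- # escape each segment independently, rejoin with '.*', then anchor with '$'
-- # unless the pattern ends with '%'. No threaded state, no per-char '%' branch.
--
-- def _esc(seg):
--     out = []
--     for ch in seg:
--         if ch in '$^*?()+[{]}|\\.':
--             out.append('\\' + ch)
--         elif ch == '_':
--             out.append('.')
--         else:
--             out.append(ch)
--     return ''.join(out)
--
-- def SQL_wildcard_transform(s: str) -> str:
--     body = '.*'.join(_esc(seg) for seg in s.split('%'))
--     return body if s.endswith('%') else body + '$'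
-- ===== Notes on version B (the rewrite author's own statement) =====
-- stated objective: simpler
-- what changed: Instead of a stateful per-character loop threading a needFinal flag, B splits the pattern into literal segments at '%', escapes each segment independently, rejoins them with '.*', and anchors with '$' iff the input does not end with '%'.
import Mathlib
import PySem

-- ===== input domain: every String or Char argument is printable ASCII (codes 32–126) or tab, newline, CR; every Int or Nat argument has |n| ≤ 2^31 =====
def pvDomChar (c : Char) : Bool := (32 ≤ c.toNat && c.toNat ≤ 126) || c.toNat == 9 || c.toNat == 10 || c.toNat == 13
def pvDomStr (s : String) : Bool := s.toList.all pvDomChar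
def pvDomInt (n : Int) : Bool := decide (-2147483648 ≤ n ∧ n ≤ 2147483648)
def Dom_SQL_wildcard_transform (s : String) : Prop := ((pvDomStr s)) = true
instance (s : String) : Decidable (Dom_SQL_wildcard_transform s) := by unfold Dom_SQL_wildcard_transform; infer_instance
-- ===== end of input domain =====

-- B splits the pattern into literal segments at '%', escapes each segment independently,
-- rejoins them with '.*', and appends '$' iff the input does not end with '%' (simpler:
-- no threaded needFinal state).


-- ===== PORT A =====
-- loop body: each iteration first sets needFinal = True, then the '%' branch resets it to
-- False, so the flag produced by one iteration is as recorded in each branch below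
def sqlwtStep (st : List Char × Bool) (ch : Char) : List Char × Bool :=
  if ("$^*?()+[{]}|\\.".toList).contains ch then (st.1 ++ ['\\', ch], true)
  else if ch = '%' then (st.1 ++ ['.', '*'], false)
  else if ch = '_' then (st.1 ++ ['.'], true)
  else (st.1 ++ [ch], true)

def SQL_wildcard_transform (s : String) : String :=
  let st := s.toList.foldl sqlwtStep ([], true)
  String.ofList (if st.2 then st.1 ++ ['$'] else st.1)

-- ===== PORT B =====
-- per-character piece appended by _esc's loop in Source B
def sqlwtEscCh (ch : Char) : List Char :=
  if ("$^*?()+[{]}|\\.".toList).contains ch then ['\\', ch]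
  else if ch = '_' then ['.']
  else [ch]

-- _esc of Source B: the loop's appended pieces, joined by ''
def sqlwtEsc (seg : List Char) : List Char :=
  PySem.Chars.join [] (seg.map sqlwtEscCh)

-- s.split('%') ported as List.splitOn '%' (exact for a one-character separator)
def SQL_wildcard_transform_alt (s : String) : String :=
  let body := PySem.Chars.join ['.', '*'] ((s.toList.splitOn '%').map sqlwtEsc)
  String.ofList (if PySem.Chars.endswith s.toList ['%'] then body else body ++ ['$'])

-- ===== PRECONDITION & SPEC =====
def Spec_SQL_wildcard_transform (s : String) (out : String) : Prop := out = SQL_wildcard_transform_alt s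
instance (s : String) (out : String) : Decidable (Spec_SQL_wildcard_transform s out) := by unfold Spec_SQL_wildcard_transform; infer_instance

-- ===== CLAIM (what is proved, stated in full; the proofs are below) =====
def Claim_equal_SQL_wildcard_transform : Prop := ∀ (s : String), Dom_SQL_wildcard_transform s → Spec_SQL_wildcard_transform s (SQL_wildcard_transform s)

-- ===== LEMMAS AND PROOFS =====

-- A's per-character contribution (escCh, with '%' mapped to '.*')
def sqlwtTr (ch : Char) : List Char :=
  if ch = '%' then ['.', '*'] else sqlwtEscCh ch

-- one step of A's fold appends exactly sqlwtTr ch, and leaves the flag 'ch is not %'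
lemma sqlwtStep_eq (r : List Char) (b : Bool) (ch : Char) :
    sqlwtStep (r, b) ch = (r ++ sqlwtTr ch, ch != '%') := by
  unfold sqlwtStep sqlwtTr sqlwtEscCh
  split_ifs with h1 h2 h3 h4 <;> simp_all

-- A's fold over l: accumulator = concatenated per-character pieces; flag = b for empty l,
-- else 'the last character is not %'
lemma sqlwt_fold (l : List Char) (r : List Char) (b : Bool) :
    l.foldl sqlwtStep (r, b) = (r ++ (l.map sqlwtTr).flatten, l.getLast?.elim b (· != '%')) := by
  induction l generalizing r b with
  | nil => simp
  | cons c cs ih =>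
    rw [List.foldl_cons, sqlwtStep_eq, ih]
    cases cs with
    | nil => simp
    | cons d ds =>
      cases hgl : (d :: ds).getLast? with
      | none => simp [List.getLast?_eq_none_iff] at hgl
      | some x => simp [List.getLast?_cons_cons, hgl]

lemma intercalate_cons2 {A : Type} (sep x y : List A) (ys : List (List A)) :
    List.intercalate sep (x :: y :: ys) = x ++ sep ++ List.intercalate sep (y :: ys) := by
  simp [List.intercalate, List.intersperse]

-- ''.join is flatten
lemma join_nil_sep (ll : List (List Char)) : PySem.Chars.join [] ll = ll.flatten := by
  unfold PySem.Chars.join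
  induction ll with
  | nil => rfl
  | cons x xs ih =>
    cases xs with
    | nil => simp [List.intercalate]
    | cons y ys => simp_all [List.intercalate, List.intersperse]

lemma sqlwtEsc_cons (c : Char) (seg : List Char) :
    sqlwtEsc (c :: seg) = sqlwtEscCh c ++ sqlwtEsc seg := by
  simp [sqlwtEsc, join_nil_sep]

-- joining B's escaped segments of splitOn '%' reproduces A's flattened per-character pieces
lemma sqlwt_join_split (l : List Char) :
    PySem.Chars.join ['.', '*'] ((l.splitOn '%').map sqlwtEsc) = (l.map sqlwtTr).flatten := by
  unfold PySem.Chars.join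
  induction l with
  | nil => simp [List.splitOn, List.splitOnP, List.splitOnP.go, sqlwtEsc, List.intercalate]
  | cons c cs ih =>
    rw [List.splitOn, List.splitOnP_cons]
    by_cases hc : c = '%'
    · subst hc
      cases h : List.splitOnP (· == '%') cs with
      | nil => exact absurd h (List.splitOnP_ne_nil _ _)
      | cons a as =>
        simp only [beq_self_eq_true, if_pos, List.map_cons, List.map_cons, List.flatten_cons]
        rw [intercalate_cons2]
        rw [show sqlwtTr '%' = ['.', '*'] from rfl]
        rw [← ih, List.splitOn, h]
        simp [sqlwtEsc, join_nil_sep]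
    · have hb : (c == '%') = false := by simp [hc]
      cases h : List.splitOnP (· == '%') cs with
      | nil => exact absurd h (List.splitOnP_ne_nil _ _)
      | cons a as =>
        simp only [hb, if_neg, Bool.false_eq_true, not_false_iff, List.modifyHead,
          List.map_cons, List.flatten_cons]
        rw [show sqlwtTr c = sqlwtEscCh c from by simp [sqlwtTr, hc]]
        rw [← ih, List.splitOn, h]
        cases as with
        | nil => simp [List.intercalate, sqlwtEsc_cons]
        | cons b bs =>
          simp only [List.map_cons]
          rw [intercalate_cons2, intercalate_cons2, sqlwtEsc_cons]
          simp

lemma endswith_single (l : List Char) (p : Char) :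
    PySem.Chars.endswith l [p] = (l.getLast? == some p) := by
  simp only [PySem.Chars.endswith, List.isSuffixOf, List.getLast?_eq_head?_reverse]
  cases h : l.reverse with
  | nil => simp
  | cons y ys => simp [List.isPrefixOf, eq_comm]

-- ===== VERDICT (by name: the statement is the Claim_ definition above) =====
theorem SQL_wildcard_transform_spec : Claim_equal_SQL_wildcard_transform := by
  intro s _
  unfold Spec_SQL_wildcard_transform SQL_wildcard_transform SQL_wildcard_transform_alt
  rw [sqlwt_fold, endswith_single, sqlwt_join_split]
  cases h : s.toList.getLast? with
  | none => simp
  | some c => by_cases hc : c = '%' <;> simp [hc]
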